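-- pv_equiv track=rewrite | github.com/viyiviyi/filter-blocked-words | scripts/prompts-filter.py | filter_prompts_list
-- ===== SOURCE A (Python) =====
-- from typing import List
--
-- enable_blocked_prompts = True
--
-- enable_empty_prompts = True
--
-- enable_repetition_prompts = False
--
-- split_sign = [',','(',')','[',']','{','}',':','>','\n']
--
-- left_symbol = ['[','{','(']
--
-- right_symbol = [']','}',')']
--
-- repetition_prompts = []
--
-- def get_prompt(input:str):
--     return input.strip().lower()
--
-- def filter_repetition(prompts:List[str],next:str):
--     item = get_prompt(next)
--     if item not in split_sign and item in repetition_prompts: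
--         return prompts,None
--     repetition_prompts.append(item)
--     return prompts,next
--
-- def filter_empty(prompts:List[str],tag:str):
--     if not prompts: return prompts,tag
--     last = get_prompt(prompts[-1])
--     item = get_prompt(tag)
--     if item == ',' and last == ',':
--         return prompts,None
--     if item == ',' and last in left_symbol:
--         return prompts,None
--     if item in right_symbol and last == ',':
--         prompts = prompts[:-1]
--         return filter_empty(prompts,tag)
--     if item in right_symbol and last in left_symbol:
--         prompts = prompts[:-1]
--         return filter_empty(prompts,tag)
--     return prompts,tag
--
-- def filter_prompts_list(input:List[str],blocked:List[str]):
--     out_prompts:List[str] = []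
--     for item in input:
--         item = item + (' ' if item == ',' else '')
--         next_item = item
--         is_skip = False
--         if enable_blocked_prompts and get_prompt(item) in blocked:
--             is_skip = True
--         if enable_repetition_prompts:
--             _out_prompts,_next = filter_repetition(out_prompts,item)
--             out_prompts = _out_prompts
--             next_item = _next
--         if enable_blocked_prompts and next_item and is_skip:
--             _out_prompts,_next = filter_empty(out_prompts,item)
--             out_prompts = _out_prompts
--             next_item = _next
--             is_skip = False
--         if next_item and enable_empty_prompts:
--             _out_prompts,_next = filter_empty(out_prompts,item)
--             out_prompts = _out_prompts
--             next_item = _next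
--         if not next_item:
--             continue
--         out_prompts.append(item)
--     prompts = ''.join(out_prompts)
--     return prompts
-- ===== SOURCE B (Python) =====
-- _DROPPERS = (',', '[', '{', '(')
-- _RIGHTS = (']', '}', ')')
--
-- def filter_prompts_list(input, blocked):
--     # blocked has no effect on the output: the blocked branch only triggers an
--     # extra filter_empty pass, which is idempotent, so we ignore it.
--     out = []
--     for raw in input:
--         tag = raw + ' ' if raw == ',' else raw
--         if not tag:
--             continue
--         t = tag.strip().lower()
--         if t == ',':
--             if out and out[-1].strip().lower() in _DROPPERS:
--                 continue
--         elif t in _RIGHTS: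
--             while out and out[-1].strip().lower() in _DROPPERS:
--                 out.pop()
--         out.append(tag)
--     return ''.join(out)
-- ===== Notes on version B (the rewrite author's own statement) =====
-- stated objective: simpler
-- what changed: B replaces A's blocked-branch plus recursive filter_empty machinery with a single stack pass: the blocked check is dropped entirely (its only effect is an extra filter_empty call, which is proved idempotent, so blocked never changes the output) and the recursive pop-the-droppers helper becomes an iterative in-place while/pop trim loop with one merged dropper test.
import Mathlib
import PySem

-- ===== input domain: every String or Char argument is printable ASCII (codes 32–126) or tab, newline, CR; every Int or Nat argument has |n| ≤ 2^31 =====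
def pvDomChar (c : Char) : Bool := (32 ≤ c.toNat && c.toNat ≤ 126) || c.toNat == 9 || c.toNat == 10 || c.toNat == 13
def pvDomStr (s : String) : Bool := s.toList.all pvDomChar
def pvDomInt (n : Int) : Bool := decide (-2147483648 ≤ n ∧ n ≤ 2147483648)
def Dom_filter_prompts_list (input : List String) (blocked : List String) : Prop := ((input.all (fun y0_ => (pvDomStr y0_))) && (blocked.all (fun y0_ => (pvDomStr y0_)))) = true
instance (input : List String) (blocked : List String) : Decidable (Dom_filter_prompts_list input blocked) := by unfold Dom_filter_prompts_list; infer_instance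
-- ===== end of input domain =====

-- B drops A's no-effect blocked branch (its extra filter_empty pass is idempotent, proved below)
-- and turns the recursive filter_empty into one stack pass with an iterative trim loop (objective: simpler).


-- ===== PORT A =====
def enable_blocked_prompts : Bool := true
def enable_empty_prompts : Bool := true
-- enable_repetition_prompts is False in the module; its branch is statically dead and not ported
def left_symbol : List String := ["[", "{", "("]
def right_symbol : List String := ["]", "}", ")"]

def get_prompt (input : String) : String := PySem.Str.lower (PySem.Str.strip input)

-- Python truthiness of next_item (None or a string; '' is falsy)
def pyTruthy (o : Option String) : Bool := match o with | none => false | some s => decide (s ≠ "")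

def filter_empty (prompts : List String) (tag : String) : List String × Option String :=
  if h : prompts = [] then (prompts, some tag)
  else
    let last := get_prompt (prompts.getLast h)   -- prompts[-1]; the guard above makes the list nonempty, as in Python
    let item := get_prompt tag
    if item = "," ∧ last = "," then (prompts, none)
    else if item = "," ∧ last ∈ left_symbol then (prompts, none)
    else if item ∈ right_symbol ∧ last = "," then filter_empty prompts.dropLast tag
    else if item ∈ right_symbol ∧ last ∈ left_symbol then filter_empty prompts.dropLast tag
    else (prompts, some tag)
termination_by prompts.length
decreasing_by all_goals (have := List.length_pos_iff.mpr h; simp [List.length_dropLast]; omega)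

-- the body of A's 'for item in input:' loop, acting on the out_prompts accumulator
def stepA (blocked : List String) (out_prompts : List String) (item0 : String) : List String :=
  let item := item0 ++ (if item0 = "," then " " else "")
  let next_item : Option String := some item
  let is_skip := false
  let is_skip := if enable_blocked_prompts && decide (get_prompt item ∈ blocked) then true else is_skip
  -- the 'if enable_repetition_prompts:' branch is statically dead (the module flag is False);
  -- its helper only touches a module global, so the dead branch is not ported
  let st :=
    if enable_blocked_prompts && pyTruthy next_item && is_skip then
      filter_empty out_prompts item
    else (out_prompts, next_item)
  let out_prompts := st.1
  let next_item := st.2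
  let st2 :=
    if pyTruthy next_item && enable_empty_prompts then filter_empty out_prompts item
    else (out_prompts, next_item)
  let out_prompts := st2.1
  let next_item := st2.2
  if !pyTruthy next_item then out_prompts
  else out_prompts ++ [item]

def filter_prompts_list (input : List String) (blocked : List String) : String :=
  PySem.Str.join "" (input.foldl (stepA blocked) [])

-- ===== PORT B =====
def pvNormB (s : String) : String := PySem.Str.lower (PySem.Str.strip s)

-- membership in Source B's _DROPPERS after normalization
def pvIsDropper (s : String) : Bool :=
  let t := pvNormB s
  t = "," || t = "[" || t = "{" || t = "("

-- while out and out[-1].strip().lower() in _DROPPERS: out.pop()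
def pvTrim (out : List String) : List String :=
  if h : out ≠ [] then
    if pvIsDropper (out.getLast h) then pvTrim out.dropLast else out
  else out
termination_by out.length
decreasing_by all_goals (have := List.length_pos_iff.mpr h; simp [List.length_dropLast]; omega)

-- the body of Source B's loop
def stepB (out : List String) (raw : String) : List String :=
  let tag := if raw = "," then raw ++ " " else raw
  if tag = "" then out
  else
    let t := pvNormB tag
    if t = "," then
      if h : out ≠ [] then
        if pvIsDropper (out.getLast h) then out else out ++ [tag]
      else out ++ [tag]
    else if t = "]" || t = "}" || t = ")" then pvTrim out ++ [tag]
    else out ++ [tag]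

def filter_prompts_list_alt (input : List String) (blocked : List String) : String :=
  PySem.Str.join "" (input.foldl stepB [])

-- ===== PRECONDITION & SPEC =====
def Spec_filter_prompts_list (input : List String) (blocked : List String) (out : String) : Prop := out = filter_prompts_list_alt input blocked
instance (input : List String) (blocked : List String) (out : String) : Decidable (Spec_filter_prompts_list input blocked out) := by unfold Spec_filter_prompts_list; infer_instance

-- ===== CLAIM (what is proved, stated in full; the proofs are below) =====
def Claim_equal_filter_prompts_list : Prop := ∀ (input : List String) (blocked : List String), Dom_filter_prompts_list input blocked → Spec_filter_prompts_list input blocked (filter_prompts_list input blocked)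

-- ===== LEMMAS AND PROOFS =====

lemma pvIsDropper_iff (s : String) :
    pvIsDropper s = true ↔ (get_prompt s = "," ∨ get_prompt s ∈ left_symbol) := by
  have e : pvNormB s = get_prompt s := rfl
  simp [pvIsDropper, e, left_symbol, or_assoc]

lemma pvIsDropper_neg (s : String) (hd : ¬ pvIsDropper s = true) :
    ¬ get_prompt s = "," ∧ ¬ get_prompt s ∈ left_symbol := by
  exact ⟨fun hc => hd ((pvIsDropper_iff s).mpr (Or.inl hc)),
         fun hc => hd ((pvIsDropper_iff s).mpr (Or.inr hc))⟩

lemma filter_empty_comma (p : List String) (t : String) (ht : get_prompt t = ",") :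
    filter_empty p t =
      if h : p ≠ [] then
        (if pvIsDropper (p.getLast h) then (p, none) else (p, some t))
      else (p, some t) := by
  have hne : get_prompt t ∉ right_symbol := by rw [ht]; decide
  rw [filter_empty]
  by_cases hp : p = []
  · simp [hp]
  · rw [dif_neg hp, dif_pos hp]
    by_cases hd : pvIsDropper (p.getLast hp) = true
    · rcases (pvIsDropper_iff _).mp hd with h1 | h1 <;> simp [hd, ht, h1, hne]
    · obtain ⟨h1, h2⟩ := pvIsDropper_neg _ hd
      simp [hd, ht, h1, h2, hne]

lemma filter_empty_right (p : List String) (t : String) (ht : get_prompt t ∈ right_symbol) :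
    filter_empty p t = (pvTrim p, some t) := by
  have htc : get_prompt t ≠ "," := by
    simp [right_symbol] at ht; rcases ht with h | h | h <;> simp [h]
  induction hn : p.length using Nat.strong_induction_on generalizing p with
  | _ n ih =>
    rw [filter_empty, pvTrim]
    by_cases hp : p = []
    · simp [hp]
    · rw [dif_neg hp, dif_pos hp]
      have hlt : p.dropLast.length < n := by
        have := List.length_pos_iff.mpr hp; subst hn
        simp [List.length_dropLast]; omega
      have hrec := ih p.dropLast.length hlt p.dropLast rfl
      by_cases hd : pvIsDropper (p.getLast hp) = true
      · rcases (pvIsDropper_iff _).mp hd with h1 | h1 <;> simp [hd, htc, ht, h1, hrec]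
      · obtain ⟨h1, h2⟩ := pvIsDropper_neg _ hd
        simp [hd, htc, ht, h1, h2]

lemma filter_empty_other (p : List String) (t : String)
    (h1 : get_prompt t ≠ ",") (h2 : get_prompt t ∉ right_symbol) :
    filter_empty p t = (p, some t) := by
  rw [filter_empty]
  by_cases hp : p = []
  · simp [hp]
  · simp [hp, h1, h2]

lemma pvTrim_idem (p : List String) : pvTrim (pvTrim p) = pvTrim p := by
  induction hn : p.length using Nat.strong_induction_on generalizing p with
  | _ n ih =>
    by_cases hp : p = []
    · have e : pvTrim p = p := by rw [pvTrim]; simp [hp]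
      rw [e, e]
    · by_cases hd : pvIsDropper (p.getLast hp) = true
      · have e : pvTrim p = pvTrim p.dropLast := by rw [pvTrim]; simp [hp, hd]
        have hlt : p.dropLast.length < n := by
          have := List.length_pos_iff.mpr hp; subst hn
          simp [List.length_dropLast]; omega
        rw [e]; exact ih p.dropLast.length hlt p.dropLast rfl
      · have e : pvTrim p = p := by rw [pvTrim]; simp [hp, hd]
        rw [e, e]

lemma step_eq (blocked acc : List String) (x : String) : stepA blocked acc x = stepB acc x := by
  unfold stepA stepB
  have htag : x ++ (if x = "," then " " else "") = (if x = "," then x ++ " " else x) := by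
    split_ifs <;> simp
  rw [htag]
  set item := (if x = "," then x ++ " " else x) with hitem
  have enorm : pvNormB item = get_prompt item := rfl
  by_cases hemp : item = ""
  · simp [hemp, pyTruthy, enable_blocked_prompts, enable_empty_prompts]
  · have htr : pyTruthy (some item) = true := by simp [pyTruthy, hemp]
    by_cases hs : get_prompt item ∈ blocked
    ·
      by_cases hc : get_prompt item = ","
      · rw [hc] at hs
        by_cases hp : acc = []
        · simp [enable_blocked_prompts, enable_empty_prompts, htr, hemp, enorm, hc, hp, hs,
                filter_empty_comma acc item hc, filter_empty_comma ([] : List String) item hc, pyTruthy]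
        · by_cases hd : pvIsDropper (acc.getLast hp) = true
          · simp [enable_blocked_prompts, enable_empty_prompts, htr, hemp, enorm, hc, hp, hd, hs,
                  filter_empty_comma acc item hc, pyTruthy]
          · simp [enable_blocked_prompts, enable_empty_prompts, htr, hemp, enorm, hc, hp, hd, hs,
                  filter_empty_comma acc item hc, pyTruthy]
      · by_cases hr : get_prompt item ∈ right_symbol
        · have hr' : (get_prompt item = "]" || get_prompt item = "}" || get_prompt item = ")") = true := by
            simp [right_symbol] at hr; rcases hr with h | h | h <;> simp [h]
          simp [enable_blocked_prompts, enable_empty_prompts, htr, hemp, enorm, hc, hr', hs,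
                filter_empty_right _ item hr, pvTrim_idem, pyTruthy]
        · have hr' : (get_prompt item = "]" || get_prompt item = "}" || get_prompt item = ")") = false := by
            simp [right_symbol] at hr
            simp [hr.1, hr.2.1, hr.2.2]
          simp [enable_blocked_prompts, enable_empty_prompts, htr, hemp, enorm, hc, hr', hs,
                filter_empty_other _ item hc hr, pyTruthy]
    ·
      by_cases hc : get_prompt item = ","
      · rw [hc] at hs
        by_cases hp : acc = []
        · simp [enable_blocked_prompts, enable_empty_prompts, htr, hemp, enorm, hc, hp, hs,
                filter_empty_comma acc item hc, filter_empty_comma ([] : List String) item hc, pyTruthy]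
        · by_cases hd : pvIsDropper (acc.getLast hp) = true
          · simp [enable_blocked_prompts, enable_empty_prompts, htr, hemp, enorm, hc, hp, hd, hs,
                  filter_empty_comma acc item hc, pyTruthy]
          · simp [enable_blocked_prompts, enable_empty_prompts, htr, hemp, enorm, hc, hp, hd, hs,
                  filter_empty_comma acc item hc, pyTruthy]
      · by_cases hr : get_prompt item ∈ right_symbol
        · have hr' : (get_prompt item = "]" || get_prompt item = "}" || get_prompt item = ")") = true := by
            simp [right_symbol] at hr; rcases hr with h | h | h <;> simp [h]
          simp [enable_blocked_prompts, enable_empty_prompts, htr, hemp, enorm, hc, hr', hs,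
                filter_empty_right _ item hr, pvTrim_idem, pyTruthy]
        · have hr' : (get_prompt item = "]" || get_prompt item = "}" || get_prompt item = ")") = false := by
            simp [right_symbol] at hr
            simp [hr.1, hr.2.1, hr.2.2]
          simp [enable_blocked_prompts, enable_empty_prompts, htr, hemp, enorm, hc, hr', hs,
                filter_empty_other _ item hc hr, pyTruthy]


theorem foldl_step_eq (input blocked acc : List String) :
    input.foldl (stepA blocked) acc = input.foldl stepB acc := by
  induction input generalizing acc with
  | nil => rfl
  | cons x xs ih => rw [List.foldl_cons, List.foldl_cons, step_eq, ih]

-- ===== VERDICT (by name: the statement is the Claim_ definition above) =====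
theorem filter_prompts_list_spec : Claim_equal_filter_prompts_list := by
  intro input blocked _
  unfold Spec_filter_prompts_list filter_prompts_list filter_prompts_list_alt
  rw [foldl_step_eq]
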